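-- pv_equiv track=rewrite | github.com/minyi-k03/Coding-Test | 프로그래머스/2/12913. 땅따먹기/땅따먹기.py | solution
-- ===== SOURCE A (Python) =====
-- def solution(land):
--     rows = len(land)
--     cols = len(land[0])
--
--     dp = [[0] * cols for _ in range(rows)]  # DP 테이블 초기화
--
--     for j in range(cols):
--         dp[0][j] = land[0][j]  # 첫 번째 행 값 초기화
--
--     for i in range(1, rows):
--         for j in range(cols):
--             max_val = 0
--             for k in range(cols):
--                 if k != j:  # 같은 열은 제외
--                     max_val = max(max_val, dp[i - 1][k])
--             dp[i][j] = land[i][j] + max_val  # 현재 칸의 최대 점수 계산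
--
--     return max(dp[rows - 1])  # 마지막 행에서 최대 값 반환
-- ===== SOURCE B (Python) =====
-- def solution(land):
--     cols = len(land[0])
--     prev = land[0]
--     for row in land[1:]:
--         m1, m2, i1 = 0, 0, -1
--         for k, v in enumerate(prev):
--             if v > m1:
--                 m1, m2, i1 = v, m1, k
--             elif v > m2:
--                 m2 = v
--         prev = [row[j] + (m2 if j == i1 else m1) for j in range(cols)]
--     return max(prev)
-- ===== Notes on version B (the rewrite author's own statement) =====
-- stated objective: faster
-- what changed: Replaced the per-cell rescan of the previous DP row (for each column j, a full inner loop over all k != j) by a single top-two-with-argmax scan of the previous row per row, turning O(rows*cols^2) into O(rows*cols).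
import Mathlib
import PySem

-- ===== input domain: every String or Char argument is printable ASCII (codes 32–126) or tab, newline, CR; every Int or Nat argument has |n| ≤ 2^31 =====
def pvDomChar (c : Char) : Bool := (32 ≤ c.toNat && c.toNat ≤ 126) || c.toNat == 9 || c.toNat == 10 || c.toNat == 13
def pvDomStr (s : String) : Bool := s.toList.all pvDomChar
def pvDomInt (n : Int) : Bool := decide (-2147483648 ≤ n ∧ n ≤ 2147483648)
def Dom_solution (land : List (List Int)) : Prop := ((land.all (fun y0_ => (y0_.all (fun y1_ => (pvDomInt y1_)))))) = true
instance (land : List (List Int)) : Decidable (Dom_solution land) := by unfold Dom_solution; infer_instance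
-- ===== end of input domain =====

-- B replaces A's per-cell rescan of the previous DP row (O(rows·cols²)) by one
-- top-two-with-argmax scan per row (O(rows·cols)); same return value on all inputs A accepts.

-- ===== PORT A =====
-- inner loop 'for k in range(cols): if k != j: max_val = max(max_val, dp[i-1][k])'
def innerA (prev : List Int) (cols : Nat) (j : Int) : Int :=
  (PySem.List.pyRange 0 (cols : Int)).foldl
    (fun mv k => if k ≠ j then max mv (PySem.List.pyGetD prev k 0) else mv) 0

-- one iteration of 'for i in range(1, rows)': builds dp[i] from dp[i-1] (= prev) and land[i] (= cur)
def rowA (cols : Nat) (prev cur : List Int) : List Int :=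
  (PySem.List.pyRange 0 (cols : Int)).map
    (fun j => PySem.List.pyGetD cur j 0 + innerA prev cols j)

def solution (land : List (List Int)) : Int :=
  (PySem.List.max?
    ((PySem.List.pyRange 1 (land.length : Int)).foldl
      (fun prev i => rowA (PySem.List.pyGetD land 0 []).length prev (PySem.List.pyGetD land i []))
      ((PySem.List.pyRange 0 ((PySem.List.pyGetD land 0 []).length : Int)).map
        (fun j => PySem.List.pyGetD (PySem.List.pyGetD land 0 []) j 0)))
    (fun x => x)).getD 0

-- ===== PORT B =====
-- one step of 'if v > m1: m1, m2, i1 = v, m1, k elif v > m2: m2 = v' on state (m1, m2, i1)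
def topTwoStep (s : Int × Int × Int) (kv : Int × Int) : Int × Int × Int :=
  if kv.2 > s.1 then (kv.2, s.1, kv.1)
  else if kv.2 > s.2.1 then (s.1, kv.2, s.2.2)
  else s

-- 'for k, v in enumerate(prev): …' starting from m1, m2, i1 = 0, 0, -1
def topTwo (prev : List Int) : Int × Int × Int :=
  (PySem.List.enumerate prev 0).foldl topTwoStep (0, 0, -1)

-- 'prev = [row[j] + (m2 if j == i1 else m1) for j in range(cols)]'
def rowB (cols : Nat) (prev cur : List Int) : List Int :=
  (PySem.List.pyRange 0 (cols : Int)).map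
    (fun j => PySem.List.pyGetD cur j 0 +
      (if j = (topTwo prev).2.2 then (topTwo prev).2.1 else (topTwo prev).1))

def solution_alt (land : List (List Int)) : Int :=
  (PySem.List.max?
    ((PySem.List.slice land (some 1)).foldl
      (fun prev row => rowB (PySem.List.pyGetD land 0 []).length prev row)
      (PySem.List.pyGetD land 0 []))
    (fun x => x)).getD 0

-- ===== PRECONDITION & SPEC =====
-- Pre_ = exactly where the Python A returns: land[0] exists and is nonempty (else IndexError /
-- max() of empty), and every row reaches the cols = len(land[0]) indices read (else IndexError).
def Pre_solution (land : List (List Int)) : Prop :=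
  land ≠ [] ∧ 0 < land.headI.length ∧ ∀ row ∈ land, land.headI.length ≤ row.length
instance (land : List (List Int)) : Decidable (Pre_solution land) := by
  unfold Pre_solution; infer_instance

def pvWitness_solution : List (List Int) := [[1, 2], [3, 4]]

def Spec_solution (land : List (List Int)) (out : Int) : Prop := out = solution_alt land
instance (land : List (List Int)) (out : Int) : Decidable (Spec_solution land out) := by
  unfold Spec_solution; infer_instance

-- ===== CLAIM (what is proved, stated in full; the proofs are below) =====
def Claim_equal_solution : Prop :=
  ∀ (land : List (List Int)), Dom_solution land → Pre_solution land →
    Spec_solution land (solution land)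

-- ===== LEMMAS AND PROOFS =====

-- Core invariant of the top-two scan: as long as 0 ≤ m2 ≤ m1 and i1 < n (every index still to
-- come), B's selection 'm2 if j == i1 else m1' tracks exactly A's running max of the scanned
-- values excluding index j (with A's 0 initial value), for every j.
theorem topTwo_select (xs : List Int) :
    ∀ (n m1 m2 i1 : Int), 0 ≤ m2 → m2 ≤ m1 → i1 < n → ∀ j : Int,
    (if j = ((PySem.List.enumerate xs n).foldl topTwoStep (m1, m2, i1)).2.2
      then ((PySem.List.enumerate xs n).foldl topTwoStep (m1, m2, i1)).2.1
      else ((PySem.List.enumerate xs n).foldl topTwoStep (m1, m2, i1)).1)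
    = (PySem.List.enumerate xs n).foldl
        (fun a kv => if kv.1 ≠ j then max a kv.2 else a)
        (if j = i1 then m2 else m1) := by
  induction xs with
  | nil => intro n m1 m2 i1 h0 h1 h2 j; simp [PySem.List.enumerate_nil]
  | cons x t ih =>
    intro n m1 m2 i1 h0 h1 h2 j
    rw [PySem.List.enumerate_cons, List.foldl_cons, List.foldl_cons]
    show (if j = ((PySem.List.enumerate t (n+1)).foldl topTwoStep (topTwoStep (m1, m2, i1) (n, x))).2.2
      then _ else _) = _
    by_cases hx1 : x > m1
    · have hs : topTwoStep (m1, m2, i1) (n, x) = (x, m1, n) := by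
        simp [topTwoStep, hx1]
      rw [hs, ih (n+1) x m1 n (by omega) (by omega) (by omega) j]
      congr 1
      simp only []
      split_ifs <;> omega
    · by_cases hx2 : x > m2
      · have hs : topTwoStep (m1, m2, i1) (n, x) = (m1, x, i1) := by
          simp [topTwoStep, hx1, hx2]
        rw [hs, ih (n+1) m1 x i1 (by omega) (by omega) (by omega) j]
        congr 1
        simp only []
        split_ifs <;> omega
      · have hs : topTwoStep (m1, m2, i1) (n, x) = (m1, m2, i1) := by
          simp [topTwoStep, hx1, hx2]
        rw [hs, ih (n+1) m1 m2 i1 (by omega) (by omega) (by omega) j]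
        congr 1
        simp only []
        split_ifs <;> omega

-- A's inner rescan over range(cols) equals B's top-two selection, when prev has length cols.
theorem rowA_eq_rowB (cols : Nat) (prev cur : List Int) (hlen : prev.length = cols) :
    rowA cols prev cur = rowB cols prev cur := by
  unfold rowA rowB
  refine List.map_congr_left ?_
  intro j _
  congr 1
  have hsel := topTwo_select prev 0 0 0 (-1) (by omega) (by omega) (by omega) j
  unfold topTwo
  rw [hsel, PySem.List.enumerate_eq_map_pyRange prev 0, List.foldl_map]
  unfold innerA
  have hinit : (if j = (-1 : Int) then (0 : Int) else 0) = 0 := by split_ifs <;> rfl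
  rw [hinit]
  have hl : PySem.List.len prev = (cols : Int) := by
    simp [PySem.List.len_eq, hlen]
  rw [hl]

theorem length_rowB (cols : Nat) (prev cur : List Int) : (rowB cols prev cur).length = cols := by
  simp [rowB, PySem.List.length_pyRange_one]

-- fold the row step over the remaining rows: A's step = B's step as long as prev keeps length cols
theorem foldl_rowA_eq_rowB (cols : Nat) :
    ∀ (rs : List (List Int)) (prev : List Int), prev.length = cols →
      rs.foldl (rowA cols) prev = rs.foldl (rowB cols) prev := by
  intro rs
  induction rs with
  | nil => intro prev _; rfl
  | cons r t ih =>
    intro prev hlen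
    rw [List.foldl_cons, List.foldl_cons, rowA_eq_rowB cols prev r hlen,
      ih (rowB cols prev r) (length_rowB cols prev r)]

theorem sol_eq (land : List (List Int)) : solution land = solution_alt land := by
  unfold solution solution_alt
  rw [PySem.List.map_pyGetD_pyRange_zero' (PySem.List.pyGetD land 0 []) 0,
    PySem.List.foldl_pyRange_pyGetD' land []
      (fun prev row => rowA (PySem.List.pyGetD land 0 []).length prev row)
      (PySem.List.pyGetD land 0 []) (by norm_num),
    PySem.List.slice_from land (by norm_num)]
  rw [foldl_rowA_eq_rowB (PySem.List.pyGetD land 0 []).length _ _ rfl]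

-- ===== VERDICT (by name: the statement is the Claim_ definition above) =====
theorem solution_spec : Claim_equal_solution := by
  intro land _ _
  unfold Spec_solution
  exact sol_eq land
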